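-- pv_equiv track=rewrite | github.com/citisy/data_parse | nl_data_parse/pre_process/spliter.py | from_segment_by_word_piece_v2
-- ===== SOURCE A (Python) =====
-- from typing import List
--
-- def from_segment_by_word_piece_v2(segment: List[str], timestamp):
--     """['un@@', 'cased'] -> ['uncased']"""
--     groups = []
--     cur = []
--     for i, t in enumerate(segment):
--         cur.append(i)
--
--         if not t.endswith('@@'):
--             groups.append(cur)
--             cur = []
--
--     assert not cur, f'the last word is not allow to be end with "@@" which is {cur}, please check about it'
--
--     new_segment = []
--     new_timestamps = []
--     for group in groups:
--         s = ''
--         t = []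
--         for idx in group:
--             ss = segment[idx]
--             if ss.endswith('@@'):
--                 ss = ss[:-2]
--             s += ss
--             if t:
--                 t[-1] = timestamp[idx][-1]
--             else:
--                 t = timestamp[idx]
--         new_segment.append(s)
--         new_timestamps.append(t)
--
--     return new_segment, new_timestamps
-- ===== SOURCE B (Python) =====
-- from typing import List
--
--
-- def from_segment_by_word_piece_v2(segment: List[str], timestamp):
--     """['un@@', 'cased'] -> ['uncased']"""
--     new_segment = []
--     new_timestamps = []
--     s = ''
--     t = []
--     for i, piece in enumerate(segment):
--         if piece.endswith('@@'):
--             s += piece[:-2]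
--         else:
--             s += piece
--         if t:
--             t[-1] = timestamp[i][-1]
--         else:
--             t = timestamp[i]
--         if not piece.endswith('@@'):
--             new_segment.append(s)
--             new_timestamps.append(t)
--             s = ''
--             t = []
--
--     assert not (segment and segment[-1].endswith('@@')), \
--         'the last word is not allow to be end with "@@", please check about it'
--
--     return new_segment, new_timestamps
-- ===== Notes on version B (the rewrite author's own statement) =====
-- stated objective: simpler
-- what changed: B replaces A's two-pass design (build an index-groups list, then re-scan each group) by a single loop over enumerate(segment) that maintains the running merged string and timestamp accumulator and emits each word when its group closes.
import Mathlib
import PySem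

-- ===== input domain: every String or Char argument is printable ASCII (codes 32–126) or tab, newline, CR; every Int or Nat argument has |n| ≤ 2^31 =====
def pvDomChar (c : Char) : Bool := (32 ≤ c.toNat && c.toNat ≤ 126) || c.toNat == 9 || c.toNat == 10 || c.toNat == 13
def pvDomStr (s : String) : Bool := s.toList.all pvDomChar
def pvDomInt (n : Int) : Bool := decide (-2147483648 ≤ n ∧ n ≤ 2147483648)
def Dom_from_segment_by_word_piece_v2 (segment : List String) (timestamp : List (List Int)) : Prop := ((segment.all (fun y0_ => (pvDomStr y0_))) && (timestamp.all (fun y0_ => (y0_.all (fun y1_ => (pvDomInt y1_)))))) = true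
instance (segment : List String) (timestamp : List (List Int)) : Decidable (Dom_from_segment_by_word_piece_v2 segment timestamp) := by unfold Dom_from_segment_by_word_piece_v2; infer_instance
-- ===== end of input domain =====

-- B is a single pass with running accumulators instead of A's two passes over an index-groups
-- list (objective: simpler). Both Pythons mutate timestamp's inner lists identically via the
-- aliasing timestamp rule; the equivalence proved here is about the RETURN value.

-- ===== PORT A =====
-- first loop of A: collect the index groups (state: groups, cur)
def pvA_pass1 : List String → Nat → List (List Nat) → List Nat → List (List Nat) × List Nat
  | [], _, groups, cur => (groups, cur)
  | piece :: rest, i, groups, cur =>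
    let cur' := cur ++ [i]
    if !(PySem.Str.endswith piece "@@") then pvA_pass1 rest (i + 1) (groups ++ [cur']) []
    else pvA_pass1 rest (i + 1) groups cur'

-- body of A's inner loop over a group (state: s, t)
def pvA_merge (segment : List String) (timestamp : List (List Int)) (st : String × List Int) (idx : Nat) : String × List Int :=
  let ss := segment.getD idx ""
  let ss := if PySem.Str.endswith ss "@@" then PySem.Str.slice ss none (some (-2)) else ss
  let s := st.1 ++ ss
  let t := if !st.2.isEmpty then st.2.dropLast ++ [(PySem.List.pyGet? (timestamp.getD idx []) (-1)).getD 0]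
           else timestamp.getD idx []
  (s, t)

-- body of A's second loop: merge one group and append the word and its timestamp
def pvA_push (segment : List String) (timestamp : List (List Int)) (acc : List String × List (List Int)) (g : List Nat) : List String × List (List Int) :=
  let st := g.foldl (pvA_merge segment timestamp) ("", [])
  (acc.1 ++ [st.1], acc.2 ++ [st.2])

def from_segment_by_word_piece_v2 (segment : List String) (timestamp : List (List Int)) : List String × List (List Int) :=
  (pvA_pass1 segment 0 [] []).1.foldl (pvA_push segment timestamp) ([], [])

-- ===== PORT B =====
-- B's single loop (state: new_segment, new_timestamps, s, t)
def pvB_loop (timestamp : List (List Int)) : List String → Nat → List String → List (List Int) → String → List Int → List String × List (List Int)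
  | [], _, ns, nt, _, _ => (ns, nt)
  | piece :: rest, i, ns, nt, s, t =>
    let s' := if PySem.Str.endswith piece "@@" then s ++ PySem.Str.slice piece none (some (-2)) else s ++ piece
    let t' := if !t.isEmpty then t.dropLast ++ [(PySem.List.pyGet? (timestamp.getD i []) (-1)).getD 0]
              else timestamp.getD i []
    if !(PySem.Str.endswith piece "@@") then pvB_loop timestamp rest (i + 1) (ns ++ [s']) (nt ++ [t']) "" []
    else pvB_loop timestamp rest (i + 1) ns nt s' t'

def from_segment_by_word_piece_v2_alt (segment : List String) (timestamp : List (List Int)) : List String × List (List Int) :=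
  pvB_loop timestamp segment 0 [] [] "" []

-- ===== PRECONDITION & SPEC =====
-- Pre_ holds exactly where Python A returns: the last piece must not end with '@@' (else the
-- assert fires), timestamp must cover segment (else IndexError), and within a run of '@@'-chained
-- pieces an empty timestamp entry may only follow empty ones (else `timestamp[idx][-1]` IndexErrors).
def Pre_from_segment_by_word_piece_v2 (segment : List String) (timestamp : List (List Int)) : Prop :=
  segment.length ≤ timestamp.length ∧
  (segment ≠ [] → PySem.Str.endswith (segment.getD (segment.length - 1) "") "@@" = false) ∧
  (∀ i < segment.length, i + 1 < segment.length →
    PySem.Str.endswith (segment.getD i "") "@@" = true →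
    timestamp.getD (i + 1) [] = [] → timestamp.getD i [] = [])
instance (segment : List String) (timestamp : List (List Int)) : Decidable (Pre_from_segment_by_word_piece_v2 segment timestamp) := by unfold Pre_from_segment_by_word_piece_v2; infer_instance

def pvWitness_from_segment_by_word_piece_v2 : List String × List (List Int) := (["un@@", "cased"], [[0, 1], [2, 3]])

def Spec_from_segment_by_word_piece_v2 (segment : List String) (timestamp : List (List Int)) (out : List String × List (List Int)) : Prop := out = from_segment_by_word_piece_v2_alt segment timestamp
instance (segment : List String) (timestamp : List (List Int)) (out : List String × List (List Int)) : Decidable (Spec_from_segment_by_word_piece_v2 segment timestamp out) := by unfold Spec_from_segment_by_word_piece_v2; infer_instance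

-- ===== CLAIM (what is proved, stated in full; the proofs are below) =====
def Claim_equal_from_segment_by_word_piece_v2 : Prop := ∀ (segment : List String) (timestamp : List (List Int)), Dom_from_segment_by_word_piece_v2 segment timestamp → Pre_from_segment_by_word_piece_v2 segment timestamp → Spec_from_segment_by_word_piece_v2 segment timestamp (from_segment_by_word_piece_v2 segment timestamp)

-- ===== LEMMAS AND PROOFS =====

theorem pvWitness_ok : Dom_from_segment_by_word_piece_v2 (pvWitness_from_segment_by_word_piece_v2.1) (pvWitness_from_segment_by_word_piece_v2.2) ∧ Pre_from_segment_by_word_piece_v2 (pvWitness_from_segment_by_word_piece_v2.1) (pvWitness_from_segment_by_word_piece_v2.2) := by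
  constructor <;> decide

-- one merged step of A equals one step of B's accumulators
theorem pvA_merge_step (segment : List String) (timestamp : List (List Int)) (piece : String)
    (i : Nat) (s : String) (t : List Int) (hget : segment.getD i "" = piece) :
    pvA_merge segment timestamp (s, t) i =
      ((if PySem.Str.endswith piece "@@" then s ++ PySem.Str.slice piece none (some (-2)) else s ++ piece),
       (if !t.isEmpty then t.dropLast ++ [(PySem.List.pyGet? (timestamp.getD i []) (-1)).getD 0]
        else timestamp.getD i [])) := by
  unfold pvA_merge
  rw [hget]
  cases hE : PySem.Str.endswith piece "@@" with
  | true =>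
    have hC : PySem.Chars.endswith piece.toList ['@', '@'] = true := by simpa using hE
    simp [hC]
  | false =>
    have hC : PySem.Chars.endswith piece.toList ['@', '@'] = false := by simpa using hE
    simp [hC]

-- the generalized loop correspondence
theorem pv_gen (segment : List String) (timestamp : List (List Int)) :
    ∀ (rest : List String) (i : Nat) (groups : List (List Nat)) (cur : List Nat)
      (ns : List String) (nt : List (List Int)) (s : String) (t : List Int),
      segment.drop i = rest →
      cur.foldl (pvA_merge segment timestamp) ("", []) = (s, t) →
      groups.foldl (pvA_push segment timestamp) ([], []) = (ns, nt) →
      (pvA_pass1 rest i groups cur).1.foldl (pvA_push segment timestamp) ([], []) =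
        pvB_loop timestamp rest i ns nt s t := by
  intro rest
  induction rest with
  | nil =>
    intro i groups cur ns nt s t _ _ hgroups
    simp [pvA_pass1, pvB_loop, hgroups]
  | cons piece rest ih =>
    intro i groups cur ns nt s t hdrop hcur hgroups
    have hget : segment.getD i "" = piece := by
      have h1 : segment[i]? = some piece := by
        rw [← List.head?_drop, hdrop]; rfl
      simp [List.getD, h1]
    have hdrop' : segment.drop (i + 1) = rest := by
      have := congrArg List.tail hdrop
      simpa [List.tail_drop] using this
    have hcur' : (cur ++ [i]).foldl (pvA_merge segment timestamp) ("", []) =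
        pvA_merge segment timestamp (s, t) i := by
      simp [List.foldl_append, hcur]
    rw [pvA_merge_step segment timestamp piece i s t hget] at hcur'
    cases hE : PySem.Str.endswith piece "@@" with
    | true =>
      have hC : PySem.Chars.endswith piece.toList ['@', '@'] = true := by simpa using hE
      simp only [hE, if_true] at hcur'
      simp only [pvA_pass1, pvB_loop, hE, Bool.not_true, Bool.false_eq_true, if_false]
      exact ih (i + 1) groups (cur ++ [i]) ns nt _ _ hdrop' hcur' hgroups
    | false =>
      have hC : PySem.Chars.endswith piece.toList ['@', '@'] = false := by simpa using hE
      simp only [hE, Bool.false_eq_true, if_false] at hcur'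
      simp only [pvA_pass1, pvB_loop, hE, Bool.not_false, if_true]
      refine ih (i + 1) (groups ++ [cur ++ [i]]) [] _ _ "" [] hdrop' rfl ?_
      simp [List.foldl_append, hgroups, pvA_push, hcur']

-- ===== VERDICT (by name: the statement is the Claim_ definition above) =====
theorem from_segment_by_word_piece_v2_spec : Claim_equal_from_segment_by_word_piece_v2 := by
  intro segment timestamp _ _
  unfold Spec_from_segment_by_word_piece_v2 from_segment_by_word_piece_v2 from_segment_by_word_piece_v2_alt
  exact pv_gen segment timestamp segment 0 [] [] [] [] "" [] rfl rfl rfl
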